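-- pv_equiv track=rewrite | github.com/philippeZim/AdventOfCode2023 | Day14/main.py | rollLeft
-- ===== SOURCE A (Python) =====
-- def rollLeft(m):
--     res = []
--     for x in m:
--         lline = [y for y in x]
--         lp = 0
--         for i, x in enumerate(lline):
--             if x == "O":
--                 lline[lp] = "O"
--                 lp += 1
--                 if lp - 1 != i:
--                     lline[i] = "."
--             elif x == "#":
--                 lp = i + 1
--         res.append("".join(lline))
--     return res
-- ===== SOURCE B (Python) =====
-- def rollLeft(m):
--     res = []
--     for x in m:
--         parts = []
--         for seg in x.split('#'):
--             k = seg.count('O')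
--             parts.append('O' * k + seg[k:].replace('O', '.'))
--         res.append('#'.join(parts))
--     return res
-- ===== Notes on version B (the rewrite author's own statement) =====
-- stated objective: idiomatic
-- what changed: Replaces A's in-place two-pointer compaction over enumerated indices with a split-on-'#' segment rebuild: each segment becomes 'O'*count + tail with its O's blanked, rejoined with '#'.
import Mathlib
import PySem

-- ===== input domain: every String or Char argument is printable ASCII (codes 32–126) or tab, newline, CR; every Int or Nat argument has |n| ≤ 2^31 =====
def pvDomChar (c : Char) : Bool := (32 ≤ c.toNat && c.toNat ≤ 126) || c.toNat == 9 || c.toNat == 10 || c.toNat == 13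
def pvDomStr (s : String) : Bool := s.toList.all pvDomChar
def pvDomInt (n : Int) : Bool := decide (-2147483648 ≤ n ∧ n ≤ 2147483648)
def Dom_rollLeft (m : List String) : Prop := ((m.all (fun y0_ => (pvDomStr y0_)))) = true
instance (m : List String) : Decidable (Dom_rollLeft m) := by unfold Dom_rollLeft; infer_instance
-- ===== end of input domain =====

-- B replaces A's in-place two-pointer compaction with a split-on-'#' segment rebuild ('O'*k + tail with O's blanked), rejoined with '#'; same result, more idiomatic.

-- ===== PORT A =====
-- one step of A's inner 'for i, x in enumerate(lline)' loop; state = (lline, lp)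
def pvStepA (st : List Char × Nat) (p : Char × Nat) : List Char × Nat :=
  match st, p with
  | (l, lp), (c, i) =>
    if c = 'O' then
      let l1 := l.set lp 'O'
      let lp1 := lp + 1
      (if lp1 - 1 ≠ i then l1.set i '.' else l1, lp1)
    else if c = '#' then (l, i + 1)
    else (l, lp)

-- one row: lline = [y for y in x]; the enumerate-loop; "".join(lline)
def pvRowA (cs : List Char) : List Char := ((cs.zipIdx).foldl pvStepA (cs, 0)).1

def rollLeft (m : List String) : List String :=
  m.foldl (fun res x => res ++ [String.ofList (pvRowA x.toList)]) []

-- ===== PORT B =====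
-- port of .replace('O', '.') on a single char (character-wise substitution)
def pvSub (c : Char) : Char := if c = 'O' then '.' else c

-- 'O' * k + seg[k:].replace('O', '.')
def pvSegB (seg : List Char) : List Char :=
  List.replicate (seg.count 'O') 'O' ++ (seg.drop (seg.count 'O')).map pvSub

-- '#'.join(... for seg in x.split('#'))
def pvRowB (cs : List Char) : List Char :=
  List.intercalate ['#'] ((cs.splitOn '#').map pvSegB)

def rollLeft_alt (m : List String) : List String :=
  m.foldl (fun res x => res ++ [String.ofList (pvRowB x.toList)]) []

-- ===== PRECONDITION & SPEC =====
def Spec_rollLeft (m : List String) (out : List String) : Prop := out = rollLeft_alt m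
instance (m : List String) (out : List String) : Decidable (Spec_rollLeft m out) := by unfold Spec_rollLeft; infer_instance

-- ===== CLAIM (what is proved, stated in full; the proofs are below) =====
def Claim_equal_rollLeft : Prop := ∀ (m : List String), Dom_rollLeft m → Spec_rollLeft m (rollLeft m)

-- ===== LEMMAS AND PROOFS =====

-- reductions of one step of A's loop
theorem pvStepA_O (l : List Char) (lp i : Nat) :
    pvStepA (l, lp) ('O', i)
      = (if lp ≠ i then (l.set lp 'O').set i '.' else l.set lp 'O', lp + 1) := by
  simp [pvStepA]

theorem pvStepA_hash (l : List Char) (lp i : Nat) : pvStepA (l, lp) ('#', i) = (l, i + 1) := by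
  simp [pvStepA]

theorem pvStepA_other (c : Char) (hO : c ≠ 'O') (hH : c ≠ '#') (l : List Char) (lp i : Nat) :
    pvStepA (l, lp) (c, i) = (l, lp) := by
  simp [pvStepA, hO, hH]

-- writing at an offset index never touches the prefix
theorem pvSetPref (P x : List Char) (j : Nat) (v : Char) :
    (P ++ x).set (P.length + j) v = P ++ x.set j v := by
  rw [List.set_append, if_neg (by omega), Nat.add_sub_cancel_left]

-- a frozen prefix P (all indices < P.length) is never touched once lp has moved past it
theorem pvShiftA (P : List Char) :
    ∀ (t : List Char) (m : Nat) (l : List Char) (lp : Nat),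
    (t.zipIdx (P.length + m)).foldl pvStepA (P ++ l, P.length + lp)
      = (P ++ ((t.zipIdx m).foldl pvStepA (l, lp)).1,
         P.length + ((t.zipIdx m).foldl pvStepA (l, lp)).2) := by
  intro t
  induction t with
  | nil => intro m l lp; simp
  | cons c t ih =>
    intro m l lp
    have estep : pvStepA (P ++ l, P.length + lp) (c, P.length + m)
        = (P ++ (pvStepA (l, lp) (c, m)).1, P.length + (pvStepA (l, lp) (c, m)).2) := by
      by_cases hO : c = 'O'
      · subst hO
        rw [pvStepA_O, pvStepA_O]
        by_cases hlm : lp = m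
        · rw [if_neg (by omega), if_neg (by omega), pvSetPref]
          exact Prod.ext rfl (by omega)
        · rw [if_pos (by omega), if_pos (by omega), pvSetPref, pvSetPref]
          exact Prod.ext rfl (by omega)
      · by_cases hH : c = '#'
        · subst hH
          rw [pvStepA_hash, pvStepA_hash]
          exact Prod.ext rfl (by omega)
        · rw [pvStepA_other c hO hH, pvStepA_other c hO hH]
    simp only [List.zipIdx_cons, List.foldl_cons]
    rw [estep]
    have hoff : P.length + m + 1 = P.length + (m + 1) := by omega
    rw [hoff]
    exact ih (m + 1) (pvStepA (l, lp) (c, m)).1 (pvStepA (l, lp) (c, m)).2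

-- A's loop over a '#'-free segment: invariant closed form
theorem pvSegA :
    ∀ (s : List Char), (∀ c ∈ s, c ≠ '#') → ∀ (k : Nat) (mid rest : List Char),
    (s.zipIdx (k + mid.length)).foldl pvStepA
        (List.replicate k 'O' ++ (mid ++ (s ++ rest)), k)
      = (List.replicate (k + s.count 'O') 'O' ++
          (((mid ++ s.map pvSub).drop (s.count 'O')) ++ rest),
         k + s.count 'O') := by
  intro s
  induction s with
  | nil => intro h k mid rest; simp
  | cons c s ih =>
    intro h k mid rest
    have hc : c ≠ '#' := h c (List.mem_cons_self)
    have hs : ∀ c' ∈ s, c' ≠ '#' := fun c' hc' => h c' (List.mem_cons_of_mem _ hc')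
    simp only [List.zipIdx_cons, List.foldl_cons]
    by_cases hO : c = 'O'
    · subst hO
      have hcnt : List.count 'O' ('O' :: s) = List.count 'O' s + 1 := by simp
      have hsub : pvSub 'O' = '.' := by simp [pvSub]
      have hrep : k + (List.count 'O' s + 1) = k + 1 + List.count 'O' s := by omega
      rcases mid with _ | ⟨d, mt⟩
      · -- mid = []
        have estep : pvStepA (List.replicate k 'O' ++ ([] ++ ('O' :: s ++ rest)), k) ('O', k + ([] : List Char).length)
            = (List.replicate (k + 1) 'O' ++ ([] ++ (s ++ rest)), k + 1) := by
          rw [pvStepA_O, if_neg (by simp)]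
          have hset : (List.replicate k 'O' ++ ([] ++ ('O' :: s ++ rest))).set k 'O'
              = List.replicate (k + 1) 'O' ++ ([] ++ (s ++ rest)) := by
            rw [List.set_append, if_neg (by simp only [List.length_replicate]; omega),
              List.length_replicate, Nat.sub_self]
            simp only [List.nil_append, List.replicate_succ']
            simp [List.append_assoc]
          rw [hset]
        rw [estep]
        have hoff : k + ([] : List Char).length + 1 = (k + 1) + ([] : List Char).length := by simp
        rw [hoff, ih hs (k + 1) [] rest, hcnt, List.map_cons, hsub, hrep]
        simp only [List.nil_append, List.drop_succ_cons]
      · -- mid = d :: mt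
        have estep : pvStepA (List.replicate k 'O' ++ ((d :: mt) ++ ('O' :: s ++ rest)), k) ('O', k + (d :: mt).length)
            = (List.replicate (k + 1) 'O' ++ ((mt ++ ['.']) ++ (s ++ rest)), k + 1) := by
          rw [pvStepA_O, if_pos (by simp)]
          have hset1 : (List.replicate k 'O' ++ ((d :: mt) ++ ('O' :: s ++ rest))).set k 'O'
              = List.replicate k 'O' ++ ('O' :: (mt ++ ('O' :: s ++ rest))) := by
            rw [List.set_append, if_neg (by simp only [List.length_replicate]; omega),
              List.length_replicate, Nat.sub_self]
            simp only [List.cons_append, List.set_cons_zero]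
          rw [hset1]
          have hidx : k + (d :: mt).length = (List.replicate k 'O').length + (mt.length + 1) := by
            simp only [List.length_replicate, List.length_cons]
          rw [hidx, pvSetPref, List.set_cons_succ]
          have hset2 : (mt ++ ('O' :: s ++ rest)).set mt.length '.' = mt ++ ('.' :: (s ++ rest)) := by
            rw [List.set_append, if_neg (by omega), Nat.sub_self]
            simp only [List.cons_append, List.set_cons_zero]
          rw [hset2]
          refine Prod.ext ?_ rfl
          simp only [List.replicate_succ']
          simp [List.append_assoc]
        rw [estep]
        have hoff : k + (d :: mt).length + 1 = (k + 1) + (mt ++ ['.']).length := by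
          simp only [List.length_cons, List.length_append, List.length_nil]; omega
        have h1 : (d :: mt) ++ '.' :: List.map pvSub s = d :: ((mt ++ ['.']) ++ List.map pvSub s) := by
          simp
        rw [hoff, ih hs (k + 1) (mt ++ ['.']) rest, hcnt, List.map_cons, hsub, hrep, h1,
          List.drop_succ_cons]
    · -- c is neither 'O' nor '#'
      have hcnt : List.count 'O' (c :: s) = List.count 'O' s := by simp [hO]
      have hsubc : pvSub c = c := by simp [pvSub, hO]
      have estep : pvStepA (List.replicate k 'O' ++ (mid ++ (c :: s ++ rest)), k) (c, k + mid.length)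
          = (List.replicate k 'O' ++ ((mid ++ [c]) ++ (s ++ rest)), k) := by
        rw [pvStepA_other c hO hc]
        refine Prod.ext ?_ rfl
        simp [List.append_assoc]
      rw [estep]
      have hoff : k + mid.length + 1 = k + (mid ++ [c]).length := by
        simp only [List.length_append, List.length_cons, List.length_nil]; omega
      have h2 : mid ++ c :: List.map pvSub s = (mid ++ [c]) ++ List.map pvSub s := by simp
      rw [hoff, ih hs k (mid ++ [c]) rest, hcnt, List.map_cons, hsubc, h2]

theorem pvSplitFirst (cs : List Char) :
    ('#' ∉ cs) ∨ ∃ s t, cs = s ++ '#' :: t ∧ '#' ∉ s := by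
  induction cs with
  | nil => exact Or.inl (by simp)
  | cons c cs ih =>
    by_cases hc : c = '#'
    · exact Or.inr ⟨[], cs, by simp [hc], by simp⟩
    · rcases ih with h | ⟨s, t, rfl, hs⟩
      · exact Or.inl (by simp [h, Ne.symm hc])
      · exact Or.inr ⟨c :: s, t, rfl, by simp [hs, Ne.symm hc]⟩

theorem pvSplitOn_no_hash (s : List Char) (h : '#' ∉ s) : s.splitOn '#' = [s] := by
  induction s with
  | nil => simp [List.splitOn, List.splitOnP_nil]
  | cons c s ih =>
    have hc : c ≠ '#' := fun he => h (he ▸ List.mem_cons_self)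
    have h' : '#' ∉ s := fun hm => h (List.mem_cons_of_mem _ hm)
    simp only [List.splitOn] at ih ⊢
    rw [List.splitOnP_cons, if_neg (by simp [hc]), ih h']
    simp [List.modifyHead]

theorem pvSplitOn_append (s t : List Char) (h : '#' ∉ s) :
    (s ++ '#' :: t).splitOn '#' = s :: t.splitOn '#' := by
  induction s with
  | nil =>
    simp only [List.nil_append, List.splitOn]
    rw [List.splitOnP_cons, if_pos (by simp)]
  | cons c s ih =>
    have hc : c ≠ '#' := fun he => h (he ▸ List.mem_cons_self)
    have h' : '#' ∉ s := fun hm => h (List.mem_cons_of_mem _ hm)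
    simp only [List.cons_append, List.splitOn] at ih ⊢
    rw [List.splitOnP_cons, if_neg (by simp [hc]), ih h']
    simp [List.modifyHead]

theorem pvSplitOn_ne_nil (t : List Char) : t.splitOn '#' ≠ [] := by
  induction t with
  | nil => simp [List.splitOn, List.splitOnP_nil]
  | cons c t ih =>
    simp only [List.splitOn] at ih ⊢
    rw [List.splitOnP_cons]
    split_ifs with h
    · simp
    · rcases h' : List.splitOnP (· == '#') t with _ | ⟨a, l⟩
      · exact absurd h' ih
      · simp [List.modifyHead]

theorem pvRow_no_hash (cs : List Char) (h : '#' ∉ cs) : pvRowA cs = pvRowB cs := by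
  have hseg := pvSegA cs (fun c hc he => h (he ▸ hc)) 0 [] []
  simp only [List.length_nil, Nat.add_zero, Nat.zero_add, List.nil_append, List.append_nil,
    List.replicate_zero] at hseg
  unfold pvRowA pvRowB pvSegB
  rw [pvSplitOn_no_hash cs h]
  simp only [List.map_cons, List.map_nil]
  rw [hseg]
  simp [List.intercalate, List.map_drop]

theorem pvRow_eq : ∀ (n : Nat) (cs : List Char), cs.length ≤ n → pvRowA cs = pvRowB cs := by
  intro n
  induction n with
  | zero =>
    intro cs hlen
    have hnil : cs = [] := List.eq_nil_of_length_eq_zero (Nat.le_zero.mp hlen)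
    subst hnil
    exact pvRow_no_hash [] (by simp)
  | succ n ih =>
    intro cs hlen
    rcases pvSplitFirst cs with hmem | ⟨s, t, rfl, hs⟩
    · exact pvRow_no_hash cs hmem
    · have hs' : ∀ c ∈ s, c ≠ '#' := fun c hc he => hs (he ▸ hc)
      have hcO : s.count 'O' ≤ s.length := List.count_le_length
      have hseg := pvSegA s hs' 0 [] ('#' :: t)
      simp only [List.length_nil, Nat.add_zero, Nat.zero_add, List.nil_append,
        List.replicate_zero] at hseg
      set Q : List Char :=
        List.replicate (s.count 'O') 'O' ++ ((s.map pvSub).drop (s.count 'O') ++ ['#']) with hQ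
      have hQlen : Q.length = s.length + 1 := by
        simp only [hQ, List.length_append, List.length_replicate, List.length_drop,
          List.length_cons, List.length_nil, List.length_map]
        omega
      have hA : pvRowA (s ++ '#' :: t) = Q ++ pvRowA t := by
        unfold pvRowA
        rw [List.zipIdx_append, List.foldl_append, hseg]
        simp only [Nat.zero_add, List.zipIdx_cons, List.foldl_cons, pvStepA_hash]
        have hX : List.replicate (s.count 'O') 'O' ++ ((s.map pvSub).drop (s.count 'O') ++ '#' :: t)
            = Q ++ t := by
          simp [hQ, List.append_assoc]
        rw [hX]
        have hoff1 : s.length + 1 = Q.length + 0 := by simp [hQlen]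
        rw [hoff1, pvShiftA Q t 0 t 0]
      obtain ⟨b, bs, hbs⟩ : ∃ b bs, t.splitOn '#' = b :: bs := by
        rcases h' : t.splitOn '#' with _ | ⟨b, bs⟩
        · exact absurd h' (pvSplitOn_ne_nil t)
        · exact ⟨b, bs, rfl⟩
      have hB : pvRowB (s ++ '#' :: t) = (pvSegB s ++ ['#']) ++ pvRowB t := by
        unfold pvRowB
        rw [pvSplitOn_append s t hs, hbs]
        simp only [List.map_cons]
        simp only [List.intercalate, List.intersperse, List.flatten_cons]
        simp [List.append_assoc]
      have hQeq : Q = pvSegB s ++ ['#'] := by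
        unfold pvSegB
        rw [hQ, List.map_drop]
        simp [List.append_assoc]
      have hlt : t.length ≤ n := by
        simp only [List.length_append, List.length_cons] at hlen; omega
      rw [hA, hB, hQeq, ih t hlt]

theorem pvRows (m : List String) (acc : List String) :
    m.foldl (fun res x => res ++ [String.ofList (pvRowA x.toList)]) acc
      = m.foldl (fun res x => res ++ [String.ofList (pvRowB x.toList)]) acc := by
  induction m generalizing acc with
  | nil => rfl
  | cons x m ih => simp only [List.foldl_cons, pvRow_eq x.toList.length x.toList le_rfl, ih]

-- ===== VERDICT (by name: the statement is the Claim_ definition above) =====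
theorem rollLeft_spec : Claim_equal_rollLeft := by
  intro m _
  unfold Spec_rollLeft rollLeft rollLeft_alt
  exact pvRows m []
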